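-- pv_equiv track=rewrite | github.com/pypi-data/pypi-mirror-389 | packages/atlas-quantum/atlas_quantum-0.6.3-py3-none-any.whl/atlas_q/tools_qih/ntt_features.py | find_prime_with_primitive_root
-- ===== SOURCE A (Python) =====
-- def _is_prime(p):
--     if p < 2:
--         return False
--     if p % 2 == 0:
--         return p == 2
--     i = 3
--     while i * i <= p:
--         if p % i == 0:
--             return False
--         i += 2
--     return True
--
-- def _powmod(a, e, m):
--     r = 1
--     a %= m
--     while e:
--         if e & 1:
--             r = (r * a) % m
--         a = (a * a) % m
--         e >>= 1
--     return r
--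
-- def _primitive_root(p):
--     # Find primitive root modulo p (p must be prime)
--     phi = p - 1
--     # factor phi (naive)
--     fac = []
--     x = phi
--     d = 2
--     while d * d <= x:
--         if x % d == 0:
--             fac.append(d)
--             while x % d == 0:
--                 x //= d
--         d += 1
--     if x > 1:
--         fac.append(x)
--     for g in range(2, p):
--         ok = True
--         for q in fac:
--             if _powmod(g, phi // q, p) == 1:
--                 ok = False
--                 break
--         if ok:
--             return g
--     return None
--
-- def find_prime_with_primitive_root(n):
--     # find a prime p where n | (p-1) and get a primitive root
--     p = max(257, n + 1)
--     while True:
--         # ensure p-1 divisible by n for convenience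
--         if (p - 1) % n == 0 and _is_prime(p):
--             g = _primitive_root(p)
--             if g is not None:
--                 return p, g
--         p += 1
-- ===== SOURCE B (Python) =====
-- def _is_prime(p):
--     if p < 2:
--         return False
--     if p % 2 == 0:
--         return p == 2
--     i = 3
--     while i * i <= p:
--         if p % i == 0:
--             return False
--         i += 2
--     return True
--
-- def _primitive_root(p):
--     # Find primitive root modulo p (p must be prime) by direct order computation:
--     # g is a primitive root iff the multiplicative order of g mod p is exactly p-1.
--     phi = p - 1
--     for g in range(2, p):
--         cur = g % p
--         count = 1
--         while cur != 1:
--             cur = (cur * g) % p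
--             count += 1
--         if count == phi:
--             return g
--     return None
--
-- def find_prime_with_primitive_root(n):
--     # find a prime p where n | (p-1) and get a primitive root
--     p = max(257, n + 1)
--     while True:
--         # ensure p-1 divisible by n for convenience
--         if (p - 1) % n == 0 and _is_prime(p):
--             g = _primitive_root(p)
--             if g is not None:
--                 return p, g
--         p += 1
-- ===== Notes on version B (the rewrite author's own statement) =====
-- stated objective: alternative
-- what changed: B's _primitive_root drops A's factor-phi-then-test-exponents strategy and instead computes the multiplicative order of each candidate g directly (repeated multiplication mod p until reaching 1), returning the first g of order p-1; _is_prime, _powmod-free outer search and the enclosing loop are unchanged.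
-- outside the precondition, e.g. on find_prime_with_primitive_root(0): A raises ZeroDivisionError, B raises ZeroDivisionError
import Mathlib
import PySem

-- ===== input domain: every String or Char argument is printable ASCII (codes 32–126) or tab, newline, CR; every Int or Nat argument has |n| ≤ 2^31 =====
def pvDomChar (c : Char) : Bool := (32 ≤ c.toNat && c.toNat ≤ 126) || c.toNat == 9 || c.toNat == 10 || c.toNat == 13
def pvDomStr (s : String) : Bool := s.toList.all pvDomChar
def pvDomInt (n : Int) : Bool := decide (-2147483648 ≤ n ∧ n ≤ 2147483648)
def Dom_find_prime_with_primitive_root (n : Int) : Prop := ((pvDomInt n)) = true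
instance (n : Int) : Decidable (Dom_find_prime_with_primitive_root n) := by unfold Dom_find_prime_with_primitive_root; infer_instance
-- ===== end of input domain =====

-- B replaces A's factor-φ-then-test-exponents search for a primitive root by a direct
-- multiplicative-order computation (objective: alternative algorithm; not claimed faster).

-- ===== PORT A =====
-- _is_prime (identical in Source A and Source B, so shared by both ports)
def isPrimeLoop (p : Int) : Nat → Int → Bool
  | 0, _ => true
  | fuel + 1, i =>
    if i * i ≤ p then
      if PySem.Int.mod p i == 0 then false else isPrimeLoop p fuel (i + 2)
    else true

def isPrime (p : Int) : Bool :=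
  if p < 2 then false
  else if PySem.Int.mod p 2 == 0 then p == 2
  else isPrimeLoop p (p.toNat + 1) 3

-- _powmod; `e & 1` = `PySem.Int.mod e 2`, `e >>= 1` = floor division by 2 (Python-exact for
-- the nonnegative exponents this program produces); the fuel only bounds the iteration count
-- (`e` halves each step, so `e.toNat + 1` rounds never run out).
def powmodLoop (r a e m : Int) : Nat → Int
  | 0 => r
  | fuel + 1 =>
    if e ≠ 0 then
      powmodLoop (if PySem.Int.mod e 2 == 1 then PySem.Int.mod (r * a) m else r)
        (PySem.Int.mod (a * a) m) (PySem.Int.floordiv e 2) m fuel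
    else r

def powmod (a e m : Int) : Int := powmodLoop 1 (PySem.Int.mod a m) e m (e.toNat + 1)

-- inner `while x % d == 0: x //= d` of _primitive_root; the fuel only bounds the
-- iteration count (x shrinks by a factor ≥ 2 per division, so x.toNat rounds never run out)
def stripLoop (d : Int) : Nat → Int → Int
  | 0, x => x
  | fuel + 1, x =>
    if PySem.Int.mod x d == 0 then stripLoop d fuel (PySem.Int.floordiv x d) else x

-- factorisation loop of _primitive_root (acc = fac)
def facLoop : Nat → Int → Int → List Int → List Int
  | 0, x, _, acc => if 1 < x then acc ++ [x] else acc
  | fuel + 1, x, d, acc =>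
    if d * d ≤ x then
      if PySem.Int.mod x d == 0 then
        facLoop fuel (stripLoop d x.toNat x) (d + 1) (acc ++ [d])
      else facLoop fuel x (d + 1) acc
    else if 1 < x then acc ++ [x] else acc

-- `ok` flag loop with break
def okLoop (phi p g : Int) : List Int → Bool
  | [] => true
  | q :: qs =>
    if powmod g (PySem.Int.floordiv phi q) p == 1 then false else okLoop phi p g qs

-- `for g in range(2, p)` of _primitive_root
def prSearch (phi p : Int) (fac : List Int) : List Int → Option Int
  | [] => none
  | g :: gs => if okLoop phi p g fac then some g else prSearch phi p fac gs

def primitiveRoot (p : Int) : Option Int :=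
  let phi := p - 1
  let fac := facLoop (phi.toNat + 2) phi 2 []
  prSearch phi p fac (PySem.List.pyRange 2 p 1)

-- fuel for the unbounded `while True` search (shared by both ports; generous bound on the
-- number of p-increments: exhaustion returns (0, 0), never reached for realistic n)
def searchFuel (n : Int) : Nat := (n.natAbs + 257) * 4096

def searchLoop (n : Int) : Nat → Int → Int × Int
  | 0, _ => (0, 0)
  | fuel + 1, p =>
    if PySem.Int.mod (p - 1) n == 0 && isPrime p then
      match primitiveRoot p with
      | some g => (p, g)
      | none => searchLoop n fuel (p + 1)
    else searchLoop n fuel (p + 1)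

def find_prime_with_primitive_root (n : Int) : Int × Int :=
  searchLoop n (searchFuel n) (max 257 (n + 1))

-- ===== PORT B =====
-- B's _primitive_root: for each g compute the multiplicative order of g mod p directly
-- (fuel p.toNat + 1 bounds the iterations; the order of g mod a prime p is at most p - 1)
def orderLoop (g p : Int) : Nat → Int → Int → Int
  | 0, _, count => count
  | fuel + 1, cur, count =>
    if cur ≠ 1 then orderLoop g p fuel (PySem.Int.mod (cur * g) p) (count + 1) else count

def orderOfMod (p g : Int) : Int := orderLoop g p (p.toNat + 1) (PySem.Int.mod g p) 1

def prAltSearch (phi p : Int) : List Int → Option Int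
  | [] => none
  | g :: gs => if orderOfMod p g == phi then some g else prAltSearch phi p gs

def primitiveRootAlt (p : Int) : Option Int :=
  prAltSearch (p - 1) p (PySem.List.pyRange 2 p 1)

def searchLoopAlt (n : Int) : Nat → Int → Int × Int
  | 0, _ => (0, 0)
  | fuel + 1, p =>
    if PySem.Int.mod (p - 1) n == 0 && isPrime p then
      match primitiveRootAlt p with
      | some g => (p, g)
      | none => searchLoopAlt n fuel (p + 1)
    else searchLoopAlt n fuel (p + 1)

def find_prime_with_primitive_root_alt (n : Int) : Int × Int :=
  searchLoopAlt n (searchFuel n) (max 257 (n + 1))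

-- ===== PRECONDITION & SPEC =====
-- Pre_ excludes only n = 0, where Python's `(p - 1) % n` raises ZeroDivisionError (in A and in B)
def Pre_find_prime_with_primitive_root (n : Int) : Prop := n ≠ 0
instance (n : Int) : Decidable (Pre_find_prime_with_primitive_root n) := by
  unfold Pre_find_prime_with_primitive_root; infer_instance

def pvWitness_find_prime_with_primitive_root : Int := 4

def Spec_find_prime_with_primitive_root (n : Int) (out : Int × Int) : Prop :=
  out = find_prime_with_primitive_root_alt n
instance (n : Int) (out : Int × Int) : Decidable (Spec_find_prime_with_primitive_root n out) := by
  unfold Spec_find_prime_with_primitive_root; infer_instance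

-- ===== CLAIM (what is proved, stated in full; the proofs are below) =====
def Claim_equal_find_prime_with_primitive_root : Prop :=
  ∀ (n : Int), Dom_find_prime_with_primitive_root n →
    Pre_find_prime_with_primitive_root n →
    Spec_find_prime_with_primitive_root n (find_prime_with_primitive_root n)

-- ===== LEMMAS AND PROOFS =====

-- ---- A's trial-division primality test is correct ----

theorem isPrimeLoop_not_dvd (p : Int) : ∀ (fuel : Nat) (i : Int), 0 < i →
    (p + 2 - i).toNat ≤ 2 * fuel → isPrimeLoop p fuel i = true →
    ∀ j : Int, i ≤ j → j * j ≤ p → (∃ k : Nat, j = i + 2 * k) → ¬ (j ∣ p) := by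
  intro fuel
  induction fuel with
  | zero =>
    intro i hi hsuf _ j hij hjp _ _
    have hj1 : 1 ≤ j := by omega
    have hjj : j ≤ j * j := by nlinarith
    omega
  | succ f ih =>
    intro i hi hsuf h j hij hjp hpar
    rw [isPrimeLoop] at h
    by_cases hii : i * i ≤ p
    · rw [if_pos hii] at h
      by_cases hmod : (PySem.Int.mod p i == 0) = true
      · rw [if_pos hmod] at h
        exact absurd h (by simp)
      · rw [if_neg hmod] at h
        obtain ⟨k, hk⟩ := hpar
        rcases Nat.eq_zero_or_pos k with hk0 | hkpos
        · have hji : j = i := by omega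
          subst hji
          intro hdvd
          exact hmod (by simpa [PySem.Int.mod_eq_zero_iff_dvd] using hdvd)
        · have hile : i ≤ p := by nlinarith
          exact ih (i + 2) (by omega) (by omega) h j (by omega) hjp
            ⟨k - 1, by omega⟩
    · exact absurd hjp (by intro hc; apply hii; nlinarith)

theorem isPrime_prime (p : Int) (h : isPrime p = true) : 2 ≤ p ∧ Nat.Prime p.toNat := by
  unfold isPrime at h
  by_cases h1 : p < 2
  · rw [if_pos h1] at h
    exact absurd h (by simp)
  rw [if_neg h1] at h
  by_cases h2 : (PySem.Int.mod p 2 == 0) = true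
  · rw [if_pos h2] at h
    have hp : p = 2 := by simpa using h
    subst hp; exact ⟨le_refl _, by decide⟩
  · rw [if_neg h2] at h
    have hp2 : 2 ≤ p := by omega
    have hmodne : PySem.Int.mod p 2 ≠ 0 := by simpa using h2
    have hodd : ¬ ((2 : Int) ∣ p) := fun hdvd =>
      hmodne ((PySem.Int.mod_eq_zero_iff_dvd p 2).mpr hdvd)
    refine ⟨hp2, ?_⟩
    by_contra hnp
    have hN2 : 2 ≤ p.toNat := by omega
    have hmp : p.toNat.minFac.Prime := Nat.minFac_prime (by omega)
    have hsq : p.toNat.minFac ^ 2 ≤ p.toNat := Nat.minFac_sq_le_self (by omega) hnp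
    have hdvd : ((p.toNat.minFac : Nat) : Int) ∣ p := by
      have h0 : ((p.toNat.minFac : Nat) : Int) ∣ ((p.toNat : Nat) : Int) :=
        Int.natCast_dvd_natCast.mpr (Nat.minFac_dvd _)
      rwa [Int.toNat_of_nonneg (by omega)] at h0
    have hne2 : p.toNat.minFac ≠ 2 := by
      intro e
      exact hodd (by rw [e] at hdvd; exact_mod_cast hdvd)
    have hmodd : p.toNat.minFac % 2 = 1 := by
      rcases Nat.even_or_odd p.toNat.minFac with he | ho
      · exact absurd ((Nat.Prime.even_iff hmp).mp he) hne2
      · exact Nat.odd_iff.mp ho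
    have hm2 : 2 ≤ p.toNat.minFac := hmp.two_le
    have hm3 : 3 ≤ p.toNat.minFac := by omega
    refine isPrimeLoop_not_dvd p (p.toNat + 1) 3 (by norm_num) (by omega) h
      ((p.toNat.minFac : Nat) : Int)
      (by exact_mod_cast hm3) ?_ ?_ hdvd
    · have : ((p.toNat.minFac * p.toNat.minFac : Nat) : Int) ≤ ((p.toNat : Nat) : Int) := by
        exact_mod_cast (by nlinarith : p.toNat.minFac * p.toNat.minFac ≤ p.toNat)
      push_cast at this
      rw [Int.toNat_of_nonneg (by omega)] at this
      exact this
    · exact ⟨(p.toNat.minFac - 3) / 2, by omega⟩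

-- ---- A's _powmod computes modular exponentiation ----

theorem powmodLoop_zero (f : Nat) (r a m : Int) : powmodLoop r a 0 m f = r := by
  cases f <;> simp [powmodLoop]

theorem powmodLoop_spec (m : Int) (hm : 2 ≤ m) :
    ∀ (fuel : Nat) (e r a : Int), 0 < e → e.toNat < 2 ^ fuel → 0 ≤ r → r < m →
      powmodLoop r a e m fuel % m = (r * a ^ e.toNat) % m ∧
        0 ≤ powmodLoop r a e m fuel ∧ powmodLoop r a e m fuel < m := by
  intro fuel
  induction fuel with
  | zero =>
    intro e r a he hlt _ _
    simp at hlt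
    omega
  | succ f ih =>
    intro e r a he hlt hr0 hrm
    rw [powmodLoop, if_pos (by omega : e ≠ 0)]
    have hfd : PySem.Int.floordiv e 2 = e / 2 := PySem.Int.floordiv_eq_ediv_of_pos (by norm_num)
    have hmd : PySem.Int.mod e 2 = e % 2 := PySem.Int.mod_eq_emod_of_pos (by norm_num)
    rw [hfd, hmd]
    set r' : Int := if (e % 2 == 1) then PySem.Int.mod (r * a) m else r with hr'
    have hr'm : 0 ≤ r' ∧ r' < m := by
      rw [hr']
      split
      · rw [PySem.Int.mod_eq_emod_of_pos (by omega)]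
        exact ⟨Int.emod_nonneg _ (by omega), Int.emod_lt_of_pos _ (by omega)⟩
      · exact ⟨hr0, hrm⟩
    have hr'c : r' % m = (r * a ^ (e % 2).toNat) % m := by
      rw [hr']
      by_cases hpar : e % 2 = 1
      · rw [if_pos (by simpa using hpar), hpar, PySem.Int.mod_eq_emod_of_pos (by omega)]
        simp [Int.emod_emod_of_dvd]
      · have he0 : e % 2 = 0 := by omega
        rw [if_neg (by simpa using hpar), he0]
        simp
    rcases Nat.eq_zero_or_pos (e / 2).toNat with h0 | hpos
    · -- e = 1
      have he1 : e = 1 := by omega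
      subst he1
      have h12 : (1 : Int) / 2 = 0 := by decide
      rw [h12, powmodLoop_zero]
      refine ⟨?_, hr'm.1, hr'm.2⟩
      simpa using hr'c
    · have he2 : 0 < e / 2 := by omega
      have h2f : (e / 2).toNat = e.toNat / 2 := by omega
      have hlt' : (e / 2).toNat < 2 ^ f := by
        rw [h2f]
        have hpow : e.toNat < 2 ^ f * 2 := by
          rw [pow_succ] at hlt; omega
        omega
      obtain ⟨hc, hb0, hbm⟩ := ih (e / 2) r' (PySem.Int.mod (a * a) m) he2 hlt' hr'm.1 hr'm.2
      refine ⟨?_, hb0, hbm⟩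
      rw [hc]
      have haa : PySem.Int.mod (a * a) m = (a * a) % m := PySem.Int.mod_eq_emod_of_pos (by omega)
      set t := (e / 2).toNat
      have het : e.toNat = 2 * t + (e % 2).toNat := by omega
      calc (r' * PySem.Int.mod (a * a) m ^ t) % m
          = (r' % m * ((PySem.Int.mod (a * a) m ^ t) % m)) % m := by rw [← Int.mul_emod]
        _ = ((r * a ^ (e % 2).toNat) % m * (((a * a) ^ t) % m)) % m := by
              rw [hr'c, haa]
              have hpowm : ((a * a) % m) ^ t % m = (a * a) ^ t % m :=
                Int.ModEq.pow t (show ((a * a) % m) ≡ (a * a) [ZMOD m] from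
                  Int.emod_emod_of_dvd _ dvd_rfl)
              rw [hpowm]
        _ = ((r * a ^ (e % 2).toNat) * ((a * a) ^ t)) % m := by rw [← Int.mul_emod]
        _ = (r * a ^ e.toNat) % m := by
              congr 1
              rw [het]
              ring
  
theorem powmod_spec (a e m : Int) (hm : 2 ≤ m) (he : 0 < e) :
    powmod a e m = a ^ e.toNat % m := by
  unfold powmod
  have hlt : e.toNat < 2 ^ (e.toNat + 1) := by
    have h1 : e.toNat < 2 ^ e.toNat := Nat.lt_two_pow_self
    have h2 : 2 ^ e.toNat ≤ 2 ^ (e.toNat + 1) := Nat.pow_le_pow_right (by norm_num) (by omega)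
    omega
  obtain ⟨hc, hb0, hbm⟩ :=
    powmodLoop_spec m hm (e.toNat + 1) e 1 (PySem.Int.mod a m) he hlt (by norm_num) (by omega)
  rw [← Int.emod_eq_of_lt hb0 hbm, hc, one_mul, PySem.Int.mod_eq_emod_of_pos (by omega)]
  have hmeq : a % m ≡ a [ZMOD m] := Int.emod_emod_of_dvd _ dvd_rfl
  simpa using (hmeq.pow e.toNat)

-- ---- A's factorisation of phi: fac holds 2 ≤ q ∣ phi and every prime divisor of phi ----

theorem stripLoop_pow (d : Int) (hd : 2 ≤ d) : ∀ (fuel : Nat) (x : Int), 0 < x →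
    x.toNat ≤ fuel →
    ∃ k : Nat, x = d ^ k * stripLoop d fuel x ∧ ¬ (d ∣ stripLoop d fuel x) ∧
      0 < stripLoop d fuel x := by
  intro fuel
  induction fuel with
  | zero => intro x hx hf; omega
  | succ f ih =>
    intro x hx hf
    rw [stripLoop]
    by_cases hm : (PySem.Int.mod x d == 0) = true
    · rw [if_pos hm]
      have hdvd : d ∣ x := by rw [← PySem.Int.mod_eq_zero_iff_dvd]; simpa using hm
      obtain ⟨c, hc⟩ := hdvd
      have hc0 : 0 < c := by nlinarith
      have hfd : PySem.Int.floordiv x d = x / d := PySem.Int.floordiv_eq_ediv_of_pos (by omega)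
      have hxd : x / d = c := by rw [hc, Int.mul_ediv_cancel_left _ (by omega : d ≠ 0)]
      have hlt : c < x := by nlinarith
      obtain ⟨k, hk, hnd, hpos⟩ := ih (PySem.Int.floordiv x d)
        (by rw [hfd, hxd]; exact hc0) (by rw [hfd, hxd]; omega)
      refine ⟨k + 1, ?_, hnd, hpos⟩
      rw [pow_succ]
      calc x = d * c := hc
        _ = d * PySem.Int.floordiv x d := by rw [hfd, hxd]
        _ = d * (d ^ k * stripLoop d f (PySem.Int.floordiv x d)) := by rw [← hk]
        _ = d ^ k * d * stripLoop d f (PySem.Int.floordiv x d) := by ring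
    · rw [if_neg hm]
      have hnd : ¬ (d ∣ x) := fun hdvd =>
        (by simpa using hm : PySem.Int.mod x d ≠ 0) ((PySem.Int.mod_eq_zero_iff_dvd x d).mpr hdvd)
      exact ⟨0, by simp, hnd, hx⟩

-- the loop-exit step of facLoop (shared by the fuel-0 and the d*d > x cases)
theorem facExit (phi x d : Int) (acc : List Int) (hx : 0 < x) (hd : 2 ≤ d)
    (hxdd : x < d * d) (hxphi : x ∣ phi)
    (hbig : ∀ r : Nat, r.Prime → (r : Int) ∣ x → d ≤ (r : Int))
    (hacc : ∀ q ∈ acc, 2 ≤ q ∧ q ∣ phi)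
    (hcompl : ∀ r : Nat, r.Prime → (r : Int) ∣ phi → ((r : Int) ∈ acc ∨ (r : Int) ∣ x)) :
    (∀ q ∈ (if 1 < x then acc ++ [x] else acc), 2 ≤ q ∧ q ∣ phi) ∧
      (∀ r : Nat, r.Prime → (r : Int) ∣ phi → (r : Int) ∈ (if 1 < x then acc ++ [x] else acc)) := by
  by_cases hx1 : 1 < x
  · rw [if_pos hx1]
    constructor
    · intro q hq
      rcases List.mem_append.mp hq with hq | hq
      · exact hacc q hq
      · have hqx : q = x := by simpa using hq
        subst hqx
        exact ⟨by omega, hxphi⟩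
    · intro r hr hrphi
      rcases hcompl r hr hrphi with hmem | hrx
      · exact List.mem_append.mpr (Or.inl hmem)
      · have hrpos : 0 < (r : Int) := by exact_mod_cast hr.pos
        have hge : d ≤ (r : Int) := hbig r hr hrx
        obtain ⟨t, ht⟩ := hrx
        have htpos : 0 < t := by nlinarith
        have ht1 : t = 1 := by
          by_contra htne
          have ht2 : 2 ≤ t := by omega
          have htn1 : t.toNat ≠ 1 := by omega
          obtain ⟨r', hr'p, hr't⟩ := Nat.exists_prime_and_dvd htn1
          have hr'int : (r' : Int) ∣ t := by
            have hcst : ((r' : Nat) : Int) ∣ ((t.toNat : Nat) : Int) :=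
              Int.natCast_dvd_natCast.mpr hr't
            rwa [Int.toNat_of_nonneg (by omega)] at hcst
          have hr'x : (r' : Int) ∣ x := ht ▸ (hr'int.mul_left _)
          have hge' : d ≤ (r' : Int) := hbig r' hr'p hr'x
          have hle' : (r' : Int) ≤ t := Int.le_of_dvd htpos hr'int
          have htd : t < d := by nlinarith
          omega
        rw [ht1, mul_one] at ht
        exact List.mem_append.mpr (Or.inr (by simp [ht]))
  · rw [if_neg hx1]
    have hx' : x = 1 := by omega
    subst hx'
    refine ⟨hacc, ?_⟩
    intro r hr hrphi
    rcases hcompl r hr hrphi with hmem | hrx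
    · exact hmem
    · have hr1 : (r : Nat) = 1 := Nat.dvd_one.mp (by exact_mod_cast hrx)
      exact absurd hr1 hr.ne_one

theorem facLoop_spec (phi : Int) : ∀ (fuel : Nat) (x d : Int) (acc : List Int), 0 < x → 2 ≤ d →
    (x + 2 - d).toNat ≤ fuel → x ∣ phi →
    (∀ r : Nat, r.Prime → (r : Int) ∣ x → d ≤ (r : Int)) →
    (∀ q ∈ acc, 2 ≤ q ∧ q ∣ phi) →
    (∀ r : Nat, r.Prime → (r : Int) ∣ phi → ((r : Int) ∈ acc ∨ (r : Int) ∣ x)) →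
    (∀ q ∈ facLoop fuel x d acc, 2 ≤ q ∧ q ∣ phi) ∧
      (∀ r : Nat, r.Prime → (r : Int) ∣ phi → (r : Int) ∈ facLoop fuel x d acc) := by
  intro fuel
  induction fuel with
  | zero =>
    intro x d acc hx hd hsuf hxphi hbig hacc hcompl
    have hd2 : x + 2 ≤ d := by omega
    have hxdd : x < d * d := by nlinarith
    rw [facLoop]
    exact facExit phi x d acc hx hd hxdd hxphi hbig hacc hcompl
  | succ f ih =>
    intro x d acc hx hd hsuf hxphi hbig hacc hcompl
    rw [facLoop]
    by_cases h1 : d * d ≤ x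
    · rw [if_pos h1]
      by_cases h2 : (PySem.Int.mod x d == 0) = true
      · rw [if_pos h2]
        have hdvd : d ∣ x := by rw [← PySem.Int.mod_eq_zero_iff_dvd]; simpa using h2
        have hdp : Nat.Prime d.toNat := by
          have hm : d.toNat.minFac.Prime := Nat.minFac_prime (by omega)
          have hmd : ((d.toNat.minFac : Nat) : Int) ∣ d := by
            have h0 : ((d.toNat.minFac : Nat) : Int) ∣ ((d.toNat : Nat) : Int) :=
              Int.natCast_dvd_natCast.mpr (Nat.minFac_dvd _)
            rwa [Int.toNat_of_nonneg (by omega)] at h0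
          have hge : d ≤ (d.toNat.minFac : Int) := hbig _ hm (hmd.trans hdvd)
          have hle : d.toNat.minFac ≤ d.toNat := Nat.minFac_le (by omega)
          have heq : d.toNat.minFac = d.toNat := by omega
          exact heq ▸ hm
        obtain ⟨k, hk, hnds, hspos⟩ := stripLoop_pow d hd x.toNat x hx (le_refl _)
        have hsdvdx : stripLoop d x.toNat x ∣ x := ⟨d ^ k, hk.trans (mul_comm _ _)⟩
        have hsle : stripLoop d x.toNat x ≤ x := Int.le_of_dvd hx hsdvdx
        have hcast : ((d.toNat : Nat) : Int) = d := Int.toNat_of_nonneg (by omega)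
        apply ih _ _ _ hspos (by omega) (by have hdx : d ≤ x := by nlinarith
                                            omega)
          (dvd_trans hsdvdx hxphi)
        · intro r hr hrs
          have hrx : (r : Int) ∣ x := hrs.trans hsdvdx
          have hge1 : d ≤ (r : Int) := hbig r hr hrx
          by_cases hrd : (r : Int) = d
          · exact absurd (hrd ▸ hrs) hnds
          · omega
        · intro q hq
          rcases List.mem_append.mp hq with hq | hq
          · exact hacc q hq
          · have hqd : q = d := by simpa using hq
            subst hqd
            exact ⟨hd, dvd_trans hdvd hxphi⟩
        · intro r hr hrphi
          rcases hcompl r hr hrphi with hmem | hrx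
          · exact Or.inl (List.mem_append.mpr (Or.inl hmem))
          · have hrp : Prime ((r : Nat) : Int) := Nat.prime_iff_prime_int.mp hr
            rw [hk] at hrx
            rcases hrp.dvd_mul.mp hrx with hpow | hrs
            · have hrd : (r : Int) ∣ d := hrp.dvd_of_dvd_pow hpow
              have hdN : (r : Nat) ∣ d.toNat := by
                rw [← hcast] at hrd; exact_mod_cast hrd
              have heqN : (r : Nat) = d.toNat := (Nat.prime_dvd_prime_iff_eq hr hdp).mp hdN
              refine Or.inl (List.mem_append.mpr (Or.inr ?_))
              rw [List.mem_singleton, heqN, hcast]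
            · exact Or.inr hrs
      · rw [if_neg h2]
        have hnd : ¬ (d ∣ x) := by
          intro hdvd
          exact h2 (by simp [(PySem.Int.mod_eq_zero_iff_dvd x d).mpr hdvd])
        apply ih _ _ _ hx (by omega) (by omega) hxphi
        · intro r hr hrx
          have h3 : d ≤ (r : Int) := hbig r hr hrx
          by_cases hrd : (r : Int) = d
          · exact absurd (hrd ▸ hrx) hnd
          · omega
        · exact hacc
        · exact hcompl
    · rw [if_neg h1]
      have hxdd : x < d * d := by omega
      exact facExit phi x d acc hx hd hxdd hxphi hbig hacc hcompl

-- ---- per-candidate equivalence: A's exponent tests ⟺ B's order computation ----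

theorem per_g (p : Int) (hp2 : 2 ≤ p) (hpr : Nat.Prime p.toNat) (g : Int)
    (hg2 : 2 ≤ g) (hgp : g < p) :
    okLoop (p - 1) p g (facLoop ((p - 1).toNat + 2) (p - 1) 2 []) = (orderOfMod p g == (p - 1)) := by
  haveI hF : Fact (Nat.Prime p.toNat) := ⟨hpr⟩
  have hp3 : 3 ≤ p := by omega
  have hq3 : 3 ≤ p.toNat := by omega
  haveI : NeZero p.toNat := ⟨by omega⟩
  haveI hF1 : Fact (1 < p.toNat) := ⟨by omega⟩
  have hpq : ((p.toNat : Nat) : Int) = p := Int.toNat_of_nonneg (by omega)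
  set q := p.toNat with hqdef
  set x : ZMod q := ((g : Int) : ZMod q) with hxdef
  have valcast : ∀ z : Int, (((z : ZMod q)).val : Int) = z % p := by
    intro z; rw [ZMod.val_intCast, hpq]
  have valone : ∀ a : ZMod q, ((a.val : Int) = 1 ↔ a = 1) := by
    intro a
    constructor
    · intro hv
      have hv' : a.val = 1 := by exact_mod_cast hv
      calc a = ((a.val : Nat) : ZMod q) := (ZMod.natCast_rightInverse a).symm
        _ = ((1 : Nat) : ZMod q) := by rw [hv']
        _ = 1 := Nat.cast_one
    · intro h1; rw [h1, ZMod.val_one]; norm_num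
  have hgm : g % p = g := Int.emod_eq_of_lt (by omega) hgp
  have hx0 : x ≠ 0 := by
    intro hx
    have hz := valcast g
    rw [← hxdef, hx, ZMod.val_zero, hgm] at hz
    simp at hz
    omega
  have hx1 : x ^ (q - 1) = 1 := ZMod.pow_card_sub_one_eq_one hx0
  set N := orderOf x with hNdef
  have hNd : N ∣ q - 1 := ZMod.orderOf_dvd_card_sub_one hx0
  have hN0 : 0 < N := orderOf_pos_iff.mpr (isOfFinOrder_iff_pow_eq_one.mpr ⟨q - 1, by omega, hx1⟩)
  have hNle : N ≤ q - 1 := Nat.le_of_dvd (by omega) hNd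
  have hphi : ((q - 1 : Nat) : Int) = p - 1 := by
    rw [Nat.cast_sub (by omega), Nat.cast_one, hpq]
  -- B's order loop returns the multiplicative order N
  have hloop : ∀ (fuel : Nat) (c : Nat), 1 ≤ c → c ≤ N →
      N - c < fuel →
      orderLoop g p fuel (((x ^ c).val : Int)) ((c : Nat) : Int) = ((N : Nat) : Int) := by
    intro fuel
    induction fuel with
    | zero => intro c _ _ hf; omega
    | succ f ih =>
      intro c hc1 hcN hf
      by_cases hxc : x ^ c = 1
      · have hcend : c = N := by
          have hd : N ∣ c := orderOf_dvd_iff_pow_eq_one.mpr hxc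
          have := Nat.le_of_dvd (by omega) hd
          omega
        rw [orderLoop, if_neg (not_not_intro ((valone _).mpr hxc)), hcend]
      · have hcur : ((x ^ c).val : Int) ≠ 1 := fun h => hxc ((valone _).mp h)
        have hcN' : c ≠ N := by
          intro e; rw [e] at hxc; exact hxc (pow_orderOf_eq_one x)
        rw [orderLoop, if_pos hcur]
        have hcastmul : (((((x ^ c).val : Int) * g : Int)) : ZMod q) = x ^ (c + 1) := by
          push_cast
          rw [show (((x ^ c).val : Nat) : ZMod q) = x ^ c from ZMod.natCast_rightInverse _,
            ← hxdef, ← pow_succ]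
        have hnext : PySem.Int.mod (((x ^ c).val : Int) * g) p = ((x ^ (c + 1)).val : Int) := by
          rw [PySem.Int.mod_eq_emod_of_pos (by omega), ← valcast, hcastmul]
        have hcount : ((c : Nat) : Int) + 1 = (((c + 1 : Nat)) : Int) := by push_cast; ring
        rw [hnext, hcount]
        exact ih (c + 1) (by omega) (by omega) (by omega)
  have hord : orderOfMod p g = ((N : Nat) : Int) := by
    unfold orderOfMod
    have hgm' : PySem.Int.mod g p = ((x ^ 1).val : Int) := by
      rw [pow_one, PySem.Int.mod_eq_emod_of_pos (by omega), ← valcast, ← hxdef]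
    rw [hgm']
    have h1 := hloop (q + 1) 1 (le_refl 1) (by omega) (by omega)
    simpa using h1
  -- A's fac list: elements are ≥ 2 divisors of p-1 and contain every prime divisor
  obtain ⟨hFq, hFc⟩ := facLoop_spec (p - 1) ((p - 1).toNat + 2) (p - 1) 2 [] (by omega)
    (le_refl 2) (by omega) dvd_rfl
    (fun r hr _ => by exact_mod_cast hr.two_le) (by simp) (fun r _ hd => Or.inr hd)
  -- A's ok loop ⟺ no exponent test hits 1
  have okiff : ∀ fac : List Int, (∀ qf ∈ fac, 2 ≤ qf ∧ qf ∣ (p - 1)) →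
      (okLoop (p - 1) p g fac = true ↔
        ∀ qf ∈ fac, x ^ ((p - 1) / qf).toNat ≠ 1) := by
    intro fac
    induction fac with
    | nil => intro _; simp [okLoop]
    | cons qf qs ih =>
      intro hall
      obtain ⟨hqf2, hqfd⟩ := hall qf (by simp)
      have he : ((p - 1) / qf) * qf = p - 1 := Int.ediv_mul_cancel hqfd
      have he1 : 1 ≤ (p - 1) / qf := by nlinarith
      have hfd : PySem.Int.floordiv (p - 1) qf = (p - 1) / qf :=
        PySem.Int.floordiv_eq_ediv_of_pos (by omega)
      have hpm : powmod g (PySem.Int.floordiv (p - 1) qf) p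
          = ((x ^ ((p - 1) / qf).toNat).val : Int) := by
        rw [hfd, powmod_spec g ((p - 1) / qf) p (by omega) (by omega),
          ← valcast (g ^ ((p - 1) / qf).toNat)]
        have hcp : ((g ^ ((p - 1) / qf).toNat : Int) : ZMod q) = x ^ ((p - 1) / qf).toNat := by
          push_cast
          rw [← hxdef]
        rw [hcp]
      rw [okLoop, hpm]
      by_cases hone : x ^ ((p - 1) / qf).toNat = 1
      · rw [if_pos (by simp [(valone _).mpr hone])]
        constructor
        · intro hfalse; exact absurd hfalse (by simp)
        · intro hall'; exact absurd hone (hall' qf (by simp))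
      · rw [if_neg (by simp only [beq_iff_eq]; exact fun h => hone ((valone _).mp h))]
        rw [ih (fun qf' hq' => hall qf' (by simp [hq']))]
        constructor
        · intro hrest qf' hqmem
          rcases (by simpa using hqmem : qf' = qf ∨ qf' ∈ qs) with rfl | hm
          · exact hone
          · exact hrest _ hm
        · intro hall' qf' hm
          exact hall' qf' (by simp [hm])
  have hNiff : (((N : Nat) : Int) == (p - 1)) = true ↔ N = q - 1 := by
    rw [beq_iff_eq, ← hphi, Nat.cast_inj]
  have hmain : okLoop (p - 1) p g (facLoop ((p - 1).toNat + 2) (p - 1) 2 []) = true ↔ N = q - 1 := by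
    rw [okiff _ hFq]
    constructor
    · intro hall
      by_contra hNe
      have hNlt : N < q - 1 := by omega
      have htd : N * ((q - 1) / N) = q - 1 := Nat.mul_div_cancel' hNd
      have ht1 : (q - 1) / N ≠ 1 := by
        intro e; rw [e, mul_one] at htd; omega
      obtain ⟨r, hrp, hrt⟩ := Nat.exists_prime_and_dvd ht1
      have hrq : r ∣ q - 1 := hrt.trans (Nat.div_dvd_of_dvd hNd)
      have hrint : (r : Int) ∣ (p - 1) := by
        rw [← hphi]; exact_mod_cast hrq
      have hrF : ((r : Nat) : Int) ∈ facLoop ((p - 1).toNat + 2) (p - 1) 2 [] := hFc r hrp hrint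
      obtain ⟨sN, hsN⟩ := hrt
      have hdivN : N ∣ (q - 1) / r := by
        refine ⟨sN, ?_⟩
        have hq1 : q - 1 = r * (N * sN) := by rw [← htd, hsN]; ring
        rw [hq1, Nat.mul_div_cancel_left _ hrp.pos]
      have hpow1 : x ^ ((q - 1) / r) = 1 := orderOf_dvd_iff_pow_eq_one.mp hdivN
      apply hall ((r : Nat) : Int) hrF
      have hcastdiv : ((p - 1) / ((r : Nat) : Int)).toNat = (q - 1) / r := by
        rw [← hphi, ← Int.natCast_ediv]
        exact Int.toNat_natCast _
      rw [hcastdiv]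
      exact hpow1
    · intro hNeq qf hqF
      obtain ⟨hq2, hqd⟩ := hFq qf hqF
      have he : ((p - 1) / qf) * qf = p - 1 := Int.ediv_mul_cancel hqd
      have he1 : 1 ≤ (p - 1) / qf := by nlinarith
      have helt : (p - 1) / qf < p - 1 := by nlinarith
      intro hone
      have hdN : N ∣ ((p - 1) / qf).toNat := orderOf_dvd_iff_pow_eq_one.mpr hone
      have hle := Nat.le_of_dvd (by omega) hdN
      have hlt : ((p - 1) / qf).toNat < q - 1 := by omega
      omega
  rw [hord]
  exact Bool.eq_iff_iff.mpr (hmain.trans hNiff.symm)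

theorem search_congr (phi p : Int) (fac : List Int) (L : List Int)
    (H : ∀ g ∈ L, okLoop phi p g fac = (orderOfMod p g == phi)) :
    prSearch phi p fac L = prAltSearch phi p L := by
  induction L with
  | nil => rfl
  | cons g gs ih =>
    rw [prSearch, prAltSearch, H g (by simp)]
    split
    · rfl
    · exact ih (fun g' hg' => H g' (by simp [hg']))

theorem primitiveRoot_eq (p : Int) (hp : isPrime p = true) :
    primitiveRoot p = primitiveRootAlt p := by
  obtain ⟨hp2, hpr⟩ := isPrime_prime p hp
  unfold primitiveRoot primitiveRootAlt
  apply search_congr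
  intro g hg
  have hmem := (PySem.List.mem_pyRange_one.mp hg)
  exact per_g p hp2 hpr g hmem.1 hmem.2

theorem searchLoop_eq (n : Int) (fuel : Nat) (p : Int) :
    searchLoop n fuel p = searchLoopAlt n fuel p := by
  induction fuel generalizing p with
  | zero => rfl
  | succ f ih =>
    rw [searchLoop, searchLoopAlt]
    by_cases hc : (PySem.Int.mod (p - 1) n == 0 && isPrime p) = true
    · rw [if_pos hc, if_pos hc, primitiveRoot_eq p (by simp only [Bool.and_eq_true] at hc; exact hc.2)]
      cases primitiveRootAlt p with
      | none => simpa using ih (p + 1)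
      | some g => rfl
    · rw [if_neg hc, if_neg hc]; exact ih (p + 1)

-- ===== VERDICT (by name: the statement is the Claim_ definition above) =====
theorem find_prime_with_primitive_root_spec : Claim_equal_find_prime_with_primitive_root := by
  intro n _ _
  unfold Spec_find_prime_with_primitive_root find_prime_with_primitive_root
    find_prime_with_primitive_root_alt
  exact searchLoop_eq n (searchFuel n) (max 257 (n + 1))
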